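-- pv_equiv track=rewrite | github.com/BelTol3011/Bpp-Tokenizer | deployment_engine.py | karma_util
-- ===== SOURCE A (Python) =====
-- def karma_util(string: str, search_char: str = "$") -> list[int]:
--     """
--     Searches a string for the search_char with attention to parentheses and stuff.
--     :param string: the string to be scanned
--     :param search_char: the char that is searched for in `string`
--     :return: the list of indeces in `string` that match `search_char` with attention to parentheses and stuff
--     """
--     assert len(search_char) == 1
--     indeces = []
--
--     in_string = False
--     in_comment = False
--     karma = 0
--     for i, char in enumerate(string):
--         if char in "({[":
--             karma += 1
--         elif char in ")}]":
--             karma -= 1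
--         elif char == '"':
--             in_string = not in_string
--         elif char == "#" and not in_string:
--             in_comment = True
--         elif char == "\n":
--             in_string = False
--             in_comment = False
--             karma = 0
--
--         if karma == 0 and not in_string and char == search_char and not in_comment:
--             indeces.append(i)
--
--     return indeces
-- ===== SOURCE B (Python) =====
-- def karma_util(string: str, search_char: str = "$") -> list[int]:
--     """Counting re-implementation: split into lines and, per line, derive the
--     state from running prefix counts (bracket depth as a sum, quote-count
--     parity for in-string, a sticky comment flag), with a running base offset;
--     a separator newline always matches when search_char is a newline."""
--     assert len(search_char) == 1
--     out = []
--     base = 0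
--     for k, line in enumerate(string.split("\n")):
--         if search_char == "\n" and k > 0:
--             out.append(base - 1)
--         depth = 0
--         quotes = 0
--         commented = False
--         for j, ch in enumerate(line):
--             depth += (ch in "({[") - (ch in ")}]")
--             quotes += ch == '"'
--             commented = commented or (ch == "#" and quotes % 2 == 0)
--             if ch == search_char and depth == 0 and quotes % 2 == 0 and not commented:
--                 out.append(base + j)
--         base += len(line) + 1
--     return out
-- ===== Notes on version B (the rewrite author's own statement) =====
-- stated objective: alternative
-- what changed: A's single flat pass with a toggling boolean/if-elif state machine is replaced by a split-on-newline outer loop whose inner scan derives the state arithmetically from running prefix counts (bracket depth as a signed sum, quote-count parity for in-string, a sticky or-accumulated comment flag) with a running base offset; exact because A resets all state at every newline.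
import Mathlib
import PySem

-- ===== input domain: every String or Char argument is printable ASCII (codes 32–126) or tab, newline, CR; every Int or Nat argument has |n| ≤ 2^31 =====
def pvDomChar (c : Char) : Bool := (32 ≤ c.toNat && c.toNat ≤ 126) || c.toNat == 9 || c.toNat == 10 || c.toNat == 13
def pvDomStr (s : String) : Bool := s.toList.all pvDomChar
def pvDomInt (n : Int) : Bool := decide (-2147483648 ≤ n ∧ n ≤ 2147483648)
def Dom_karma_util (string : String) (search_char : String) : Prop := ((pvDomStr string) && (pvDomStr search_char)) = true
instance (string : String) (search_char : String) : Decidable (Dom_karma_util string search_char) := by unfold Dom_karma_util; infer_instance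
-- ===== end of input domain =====

-- B replaces A's single flat if/elif state machine by a split-on-'\n' outer loop whose inner scan
-- derives the state arithmetically from running prefix counts (an alternative decomposition;
-- exact because A resets all state at '\n').


-- ===== PORT A =====
-- one step of A's loop body: state = (indeces, in_string, in_comment, karma), input = (i, char)
def aStep (sc : List Char) (st : List Int × Bool × Bool × Int) (p : Int × Char) :
    List Int × Bool × Bool × Int :=
  let t : Bool × Bool × Int :=
    if p.2 = '(' ∨ p.2 = '{' ∨ p.2 = '[' then (st.2.1, st.2.2.1, st.2.2.2 + 1)
    else if p.2 = ')' ∨ p.2 = '}' ∨ p.2 = ']' then (st.2.1, st.2.2.1, st.2.2.2 - 1)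
    else if p.2 = '"' then (!st.2.1, st.2.2.1, st.2.2.2)
    else if p.2 = '#' ∧ st.2.1 = false then (st.2.1, true, st.2.2.2)
    else if p.2 = '\n' then (false, false, 0)
    else (st.2.1, st.2.2.1, st.2.2.2)
  if t.2.2 = 0 ∧ t.1 = false ∧ [p.2] = sc ∧ t.2.1 = false then
    (st.1 ++ [p.1], t.1, t.2.1, t.2.2)
  else (st.1, t.1, t.2.1, t.2.2)

def karma_util (string : String) (search_char : String) : List Int :=
  ((PySem.List.enumerate string.toList 0).foldl (aStep search_char.toList)
    ([], false, false, 0)).1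

-- ===== PORT B =====
-- one step of B's inner (per-line) loop: state = (out, depth, quotes, commented);
-- everything is computed by arithmetic on the counters, appends base + j
def bStep (sc : List Char) (base : Int) (st : List Int × Int × Int × Bool) (p : Int × Char) :
    List Int × Int × Int × Bool :=
  let depth := st.2.1 + (if p.2 = '(' ∨ p.2 = '{' ∨ p.2 = '[' then 1 else 0)
                      - (if p.2 = ')' ∨ p.2 = '}' ∨ p.2 = ']' then 1 else 0)
  let quotes := st.2.2.1 + (if p.2 = '"' then 1 else 0)
  let commented := st.2.2.2 || (decide (p.2 = '#') && decide (quotes % 2 = 0))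
  let out := if [p.2] = sc ∧ depth = 0 ∧ quotes % 2 = 0 ∧ commented = false
             then st.1 ++ [base + p.1] else st.1
  (out, depth, quotes, commented)

-- B's inner loop over one line, counters starting from zero
def bLine (sc : List Char) (base : Int) (out : List Int) (part : List Char) : List Int :=
  ((PySem.List.enumerate part 0).foldl (bStep sc base) (out, 0, 0, false)).1

def karma_util_alt (string : String) (search_char : String) : List Int :=
  let sc := search_char.toList
  ((PySem.List.enumerate (PySem.Chars.splitOn string.toList "\n".toList) 0).foldl
    (fun (st : List Int × Int) (q : Int × List Char) =>
      (bLine sc st.2 (if sc = ['\n'] ∧ 0 < q.1 then st.1 ++ [st.2 - 1] else st.1) q.2,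
        st.2 + (q.2.length : Int) + 1))
    ([], 0)).1

-- ===== PRECONDITION & SPEC =====
-- A asserts len(search_char) == 1 (AssertionError otherwise); Pre_ excludes exactly those inputs.
def Pre_karma_util (string : String) (search_char : String) : Prop :=
  search_char.toList.length = 1
instance (string : String) (search_char : String) : Decidable (Pre_karma_util string search_char) := by
  unfold Pre_karma_util; infer_instance

def pvWitness_karma_util : String × String := ("a$(b$)\n#x$", "$")

def Spec_karma_util (string : String) (search_char : String) (out : List Int) : Prop := out = karma_util_alt string search_char
instance (string : String) (search_char : String) (out : List Int) : Decidable (Spec_karma_util string search_char out) := by unfold Spec_karma_util; infer_instance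

-- ===== CLAIM (what is proved, stated in full; the proofs are below) =====
def Claim_equal_karma_util : Prop := ∀ (string : String) (search_char : String), Dom_karma_util string search_char → Pre_karma_util string search_char → Spec_karma_util string search_char (karma_util string search_char)

-- ===== LEMMAS AND PROOFS =====
-- prepend a prefix to the head part of a split
def consHead (p : List Char) : List (List Char) → List (List Char)
  | [] => [p]
  | h :: t => (p ++ h) :: t

-- simple recursive characterisation of split on the single char '\n'
def splitOne : List Char → List (List Char)
  | [] => [[]]
  | c :: cs => if c = '\n' then [] :: splitOne cs else consHead [c] (splitOne cs)

theorem splitOne_ne_nil (cs : List Char) : splitOne cs ≠ [] := by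
  cases cs with
  | nil => simp [splitOne]
  | cons c cs =>
    simp only [splitOne]
    split
    · simp
    · cases h : splitOne cs <;> simp [consHead]

theorem go_single (fuel : Nat) :
    ∀ (l cur : List Char) (acc : List (List Char)), l.length < fuel →
      PySem.Chars.splitOn.go ['\n'] fuel l cur acc =
        acc.reverse ++ consHead cur.reverse (splitOne l) := by
  induction fuel with
  | zero => intro l cur acc h; omega
  | succ fuel ih =>
    intro l cur acc h
    cases l with
    | nil => simp [PySem.Chars.splitOn.go, splitOne, consHead]
    | cons c rest =>
      simp only [PySem.Chars.splitOn.go]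
      by_cases hc : c = '\n'
      · subst hc
        rw [if_pos (by simp [List.isPrefixOf])]
        have hd : List.drop ['\n'].length ('\n' :: rest) = rest := rfl
        rw [hd]
        simp only [List.length_cons] at h
        rw [ih rest [] (cur.reverse :: acc) (by omega)]
        simp only [splitOne, List.reverse_cons, List.reverse_nil, List.append_assoc]
        cases hs : splitOne rest with
        | nil => exact absurd hs (splitOne_ne_nil rest)
        | cons a b => simp [consHead]
      · rw [if_neg (by simp [List.isPrefixOf]; exact fun hh => hc hh.symm)]
        simp only [List.length_cons] at h
        rw [ih rest (c :: cur) acc (by omega)]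
        simp only [splitOne, if_neg hc]
        cases hs : splitOne rest with
        | nil => exact absurd hs (splitOne_ne_nil rest)
        | cons a b => simp [consHead]

theorem splitOn_newline (cs : List Char) :
    PySem.Chars.splitOn cs ['\n'] = splitOne cs := by
  show PySem.Chars.splitOn.go ['\n'] (cs.length + 1) cs [] [] = _
  rw [go_single (cs.length + 1) cs [] [] (by omega)]
  cases hs : splitOne cs with
  | nil => exact absurd hs (splitOne_ne_nil cs)
  | cons a b => simp [consHead]

theorem splitOne_no_newline :
    ∀ (cs : List Char), ∀ p ∈ splitOne cs, ∀ c ∈ p, c ≠ '\n' := by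
  intro cs
  induction cs with
  | nil => simp [splitOne]
  | cons c cs ih =>
    simp only [splitOne]
    by_cases hc : c = '\n'
    · simp only [if_pos hc]
      intro p hp
      rcases List.mem_cons.mp hp with h | h
      · simp [h]
      · exact ih p h
    · simp only [if_neg hc]
      cases hs : splitOne cs with
      | nil => exact absurd hs (splitOne_ne_nil cs)
      | cons a b =>
        simp only [consHead, List.singleton_append]
        intro p hp
        rcases List.mem_cons.mp hp with h | h
        · subst h
          intro x hx
          rcases List.mem_cons.mp hx with h | h
          · rw [h]; exact hc
          · exact ih a (by rw [hs]; exact List.mem_cons_self) x h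
        · exact ih p (by rw [hs]; exact List.mem_cons_of_mem a h)

-- B's outer loop, written as structural recursion over the remaining parts
-- (a separator newline precedes every part it handles)
def procRest (sc : List Char) : Int → List Int → List (List Char) → List Int
  | _, out, [] => out
  | base, out, h :: t =>
      procRest sc (base + (h.length : Int) + 1)
        (bLine sc base (if sc = ['\n'] then out ++ [base - 1] else out) h) t

-- the whole of B's outer loop: head part without a separator, then procRest
def procAll (sc : List Char) (base : Int) (out : List Int) : List (List Char) → List Int
  | [] => out
  | h :: t => procRest sc (base + (h.length : Int) + 1) (bLine sc base out h) t

-- B's fold over enumerate, from index s ≥ 1, equals procRest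
theorem outer_eq (sc : List Char) :
    ∀ (parts : List (List Char)) (s : Int) (out : List Int) (base : Int), 0 < s →
      ((PySem.List.enumerate parts s).foldl
        (fun (st : List Int × Int) (q : Int × List Char) =>
          (bLine sc st.2 (if sc = ['\n'] ∧ 0 < q.1 then st.1 ++ [st.2 - 1] else st.1) q.2,
            st.2 + (q.2.length : Int) + 1)) (out, base)).1 =
      procRest sc base out parts := by
  intro parts
  induction parts with
  | nil => intro s out base _; simp [PySem.List.enumerate_nil, procRest]
  | cons h t ih =>
    intro s out base hs
    rw [PySem.List.enumerate_cons]
    simp only [List.foldl_cons, procRest]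
    by_cases hn : sc = ['\n']
    · rw [if_pos ⟨hn, hs⟩, if_pos hn]
      exact ih (s + 1) _ _ (by omega)
    · rw [if_neg (fun hh => hn hh.1), if_neg hn]
      exact ih (s + 1) _ _ (by omega)

-- view a B-state as the A-state it represents (in_string = quote parity)
def phi (st : List Int × Int × Int × Bool) : List Int × Bool × Bool × Int :=
  (st.1, decide (st.2.2.1 % 2 = 1), st.2.2.2, st.2.1)

-- one non-newline step of A, started from the A-view of a B-state, is the A-view of B's step
set_option maxRecDepth 4000 in
theorem step_comm (sc : List Char) (base j : Int) (st : List Int × Int × Int × Bool)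
    (ch : Char) (hch : ch ≠ '\n') :
    aStep sc (phi st) (base + j, ch) = phi (bStep sc base st (j, ch)) := by
  obtain ⟨o, d, q, c⟩ := st
  by_cases h1 : ch = '(' ∨ ch = '{' ∨ ch = '['
  · have h2 : ¬ (ch = ')' ∨ ch = '}' ∨ ch = ']') := by rcases h1 with h|h|h <;> subst h <;> decide
    have h3 : ch ≠ '"' := by rcases h1 with h|h|h <;> subst h <;> decide
    have h4 : ch ≠ '#' := by rcases h1 with h|h|h <;> subst h <;> decide
    simp only [phi, aStep, bStep, if_pos h1, if_neg h2, if_neg h3, h4, false_and, if_false,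
      if_neg hch, decide_eq_true_eq, add_zero, sub_zero, Bool.false_and, Bool.and_false,
      Bool.or_false]
    split_ifs with hA hB hB <;> simp_all <;> omega
  · by_cases h2 : ch = ')' ∨ ch = '}' ∨ ch = ']'
    · have h3 : ch ≠ '"' := by rcases h2 with h|h|h <;> subst h <;> decide
      have h4 : ch ≠ '#' := by rcases h2 with h|h|h <;> subst h <;> decide
      simp only [phi, aStep, bStep, if_neg h1, if_pos h2, if_neg h3, h4, false_and, if_false,
        if_neg hch, add_zero, Bool.false_and, Bool.and_false, Bool.or_false]
      split_ifs with hA hB hB <;> simp_all <;> omega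
    · by_cases h3 : ch = '"'
      · have h4 : ch ≠ '#' := by subst h3; decide
        have hpar : (!decide (q % 2 = 1)) = decide ((q + 1) % 2 = 1) := by
          by_cases hp : q % 2 = 1
          · simp only [hp, decide_true, Bool.not_true]
            have : (q + 1) % 2 = 0 := by omega
            simp [this]
          · simp only [hp, decide_false, Bool.not_false]
            have : (q + 1) % 2 = 1 := by omega
            simp [this]
        simp only [phi, aStep, bStep, if_neg h1, if_neg h2, if_pos h3, h4, false_and, if_false,
          if_neg hch, sub_zero, Bool.false_and, Bool.and_false, Bool.or_false, hpar]
        split_ifs with hA hB hB <;> simp_all <;> omega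
      · by_cases h4 : ch = '#'
        · -- '#': A sets in_comment when not in_string; B or-accumulates the flag
          subst h4
          have e1 : ¬(('#':Char) = '(' ∨ ('#':Char) = '{' ∨ ('#':Char) = '[') := by decide
          have e2 : ¬(('#':Char) = ')' ∨ ('#':Char) = '}' ∨ ('#':Char) = ']') := by decide
          have e3 : ('#':Char) ≠ '"' := by decide
          have e5 : ('#':Char) ≠ '\n' := by decide
          simp only [phi, aStep, bStep, if_neg e1, if_neg e2, if_neg e3, if_neg e5,
            add_zero, sub_zero, decide_true, Bool.true_and, true_and]
          by_cases hp : q % 2 = 1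
          · have hd : decide (q % 2 = 1) = true := by simp [hp]
            have hb : decide (q % 2 = 0) = false := by simp [show ¬ q % 2 = 0 by omega]
            simp only [hd, hb, Bool.or_false]
            clear hd hb h1 h2 h3 e1 e2 e3 e5 hch
            split_ifs with h5 h6 h7 h8 h9 <;> (try rfl) <;> (try contradiction) <;> (try exact h5.2.2.2.elim) <;> (try exact Bool.noConfusion h5.2.1) <;> (try exact absurd h5.2.2.1 (by omega)) <;> (try exact h6.2.2.2.elim) <;> (try exact Bool.noConfusion h6.2.1) <;> (try exact absurd h6.2.2.1 (by omega)) <;> (try exact h7.2.2.2.elim) <;> (try exact Bool.noConfusion h7.2.1) <;> (try exact absurd h7.2.2.1 (by omega)) <;> (try exact h8.2.2.2.elim) <;> (try exact Bool.noConfusion h8.2.1) <;> (try exact absurd h8.2.2.1 (by omega)) <;> (try exact h9.2.2.2.elim) <;> (try exact Bool.noConfusion h9.2.1) <;> (try exact absurd h9.2.2.1 (by omega)) <;> (try tauto) <;> (try (exfalso; omega))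
          · have hd : decide (q % 2 = 1) = false := by simp [hp]
            have hb : decide (q % 2 = 0) = true := by simp [show q % 2 = 0 by omega]
            simp only [hd, hb, Bool.or_true]
            clear hd hb h1 h2 h3 e1 e2 e3 e5 hch
            split_ifs with h5 h6 h7 h8 h9 <;> (try rfl) <;> (try contradiction) <;> (try exact h5.2.2.2.elim) <;> (try exact Bool.noConfusion h5.2.1) <;> (try exact absurd h5.2.2.1 (by omega)) <;> (try exact h6.2.2.2.elim) <;> (try exact Bool.noConfusion h6.2.1) <;> (try exact absurd h6.2.2.1 (by omega)) <;> (try exact h7.2.2.2.elim) <;> (try exact Bool.noConfusion h7.2.1) <;> (try exact absurd h7.2.2.1 (by omega)) <;> (try exact h8.2.2.2.elim) <;> (try exact Bool.noConfusion h8.2.1) <;> (try exact absurd h8.2.2.1 (by omega)) <;> (try exact h9.2.2.2.elim) <;> (try exact Bool.noConfusion h9.2.1) <;> (try exact absurd h9.2.2.1 (by omega)) <;> (try tauto) <;> (try (exfalso; omega))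
        · -- ordinary character: the state is unchanged on both sides
          simp only [phi, aStep, bStep, if_neg h1, if_neg h2, if_neg h3,
            (show ¬ (ch = '#' ∧ (decide (q % 2 = 1) : Bool) = false) from fun hh => h4 hh.1),
            if_false, if_neg hch, add_zero, sub_zero, h4, decide_false, Bool.false_and,
            Bool.or_false]
          split_ifs with hA hB hB <;> simp_all <;> omega

-- A's inner fold from the A-view of a B-state is the A-view of B's fold (newline-free lines)
theorem inner_eq (sc : List Char) :
    ∀ (h : List Char) (base j : Int) (st : List Int × Int × Int × Bool),
      (∀ x ∈ h, x ≠ '\n') →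
      (PySem.List.enumerate h (base + j)).foldl (aStep sc) (phi st) =
        phi ((PySem.List.enumerate h j).foldl (bStep sc base) st) := by
  intro h
  induction h with
  | nil => intro base j st _; simp [PySem.List.enumerate_nil]
  | cons ch cs ih =>
    intro base j st hnl
    rw [PySem.List.enumerate_cons, PySem.List.enumerate_cons]
    simp only [List.foldl_cons]
    rw [step_comm sc base j st ch (hnl ch List.mem_cons_self)]
    have hsh : base + j + 1 = base + (j + 1) := by ring
    rw [hsh]
    exact ih base (j + 1) _ (fun x hx => hnl x (List.mem_cons_of_mem ch hx))

-- the shape main_eq produces: head segment from an arbitrary A-state, then procRest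
def headForm (sc : List Char) (base : Int) (out : List Int)
    (st : Bool × Bool × Int) (parts : List (List Char)) : List Int :=
  match parts with
  | [] => out
  | h :: t =>
    procRest sc (base + (h.length : Int) + 1)
      ((PySem.List.enumerate h base).foldl (aStep sc) (out, st.1, st.2.1, st.2.2)).1 t

-- from a FRESH state, headForm on a split is exactly procAll
theorem headForm_fresh (sc : List Char) (base : Int) (out : List Int) (cs : List Char) :
    headForm sc base out (false, false, 0) (splitOne cs) =
      procAll sc base out (splitOne cs) := by
  cases hs : splitOne cs with
  | nil => rfl
  | cons h t =>
    have hfree : ∀ x ∈ h, x ≠ '\n' :=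
      fun x hx => splitOne_no_newline cs h (by rw [hs]; exact List.mem_cons_self) x hx
    have hbl : ((PySem.List.enumerate h base).foldl (aStep sc)
        (out, false, false, (0:Int))).1 = bLine sc base out h := by
      unfold bLine
      have hst : (out, false, false, (0:Int)) = phi (out, (0:Int), (0:Int), false) := by
        simp [phi]
      have := inner_eq sc h base 0 (out, 0, 0, false) hfree
      have hb0 : base + 0 = base := by ring
      rw [hb0] at this
      rw [hst, this]
      simp [phi]
    simp only [headForm, procAll, hbl]

-- main invariant: A's fold from an arbitrary state equals the line decomposition
theorem main_eq (sc : List Char) :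
    ∀ (cs : List Char) (base : Int) (out : List Int) (ins inc : Bool) (ka : Int),
      ((PySem.List.enumerate cs base).foldl (aStep sc) (out, ins, inc, ka)).1 =
        headForm sc base out (ins, inc, ka) (splitOne cs) := by
  intro cs
  induction cs with
  | nil =>
    intro base out ins inc ka
    simp [splitOne, headForm, PySem.List.enumerate_nil, procRest]
  | cons c cs ih =>
    intro base out ins inc ka
    rw [PySem.List.enumerate_cons]
    simp only [List.foldl_cons]
    by_cases hc : c = '\n'
    · subst hc
      have hstep : aStep sc (out, ins, inc, ka) (base, '\n') =
          ((if sc = ['\n'] then out ++ [base] else out), false, false, 0) := by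
        by_cases hsc : sc = ['\n'] <;> simp [aStep, eq_comm, hsc]
      rw [hstep, ih (base + 1) _ false false 0, headForm_fresh]
      have hsplit : splitOne ('\n' :: cs) = [] :: splitOne cs := by simp [splitOne]
      rw [hsplit]
      cases hs : splitOne cs with
      | nil => exact absurd hs (splitOne_ne_nil cs)
      | cons h' t' =>
        simp only [headForm, procAll, procRest, PySem.List.enumerate_nil, List.foldl_nil,
          List.length_nil, Nat.cast_zero, add_zero]
        have h1 : base + 1 - 1 = base := by ring
        rw [h1]
    · have hs1 : splitOne (c :: cs) = consHead [c] (splitOne cs) := by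
        simp [splitOne, hc]
      rw [ih (base + 1) _ _ _ _, hs1]
      cases hs : splitOne cs with
      | nil => exact absurd hs (splitOne_ne_nil cs)
      | cons h' t' =>
        simp only [consHead, List.singleton_append, headForm]
        have hre : ∀ (o : List Int) (s1 : Bool) (s2 : Bool) (s3 : Int),
            (PySem.List.enumerate (c :: h') base).foldl (aStep sc) (o, s1, s2, s3) =
              (PySem.List.enumerate h' (base + 1)).foldl (aStep sc)
                (aStep sc (o, s1, s2, s3) (base, c)) := by
          intro o s1 s2 s3
          rw [PySem.List.enumerate_cons]
          simp
        rw [hre]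
        have hlen : base + ((c :: h').length : Int) + 1 = base + 1 + (h'.length : Int) + 1 := by
          simp [List.length_cons]; ring
        rw [hlen]

-- ===== VERDICT (by name: the statement is the Claim_ definition above) =====
theorem karma_util_spec : Claim_equal_karma_util := by
  intro string search_char _ _
  unfold Spec_karma_util karma_util karma_util_alt
  rw [main_eq, headForm_fresh]
  have hnl : "\n".toList = ['\n'] := rfl
  rw [hnl, splitOn_newline]
  cases hs : splitOne string.toList with
  | nil => exact absurd hs (splitOne_ne_nil string.toList)
  | cons h t =>
    rw [PySem.List.enumerate_cons]
    simp only [List.foldl_cons, procAll]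
    rw [if_neg (by rintro ⟨_, hlt⟩; omega)]
    rw [outer_eq search_char.toList t (0 + 1) _ _ (by omega)]
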